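-- pv_equiv track=rewrite | github.com/sandrohp88/code_fight | arcade/the core/intro_gates.py | lateRide
-- ===== SOURCE A (Python) =====
-- def lateRide(n):
--     hours = n // 60
--     minutes = n % 60
--     str_hours_minutes = str(hours)
--     str_hours_minutes += str(minutes)
--     result = 0
--     for s in str_hours_minutes:
--         result += int(s)
--     return result
-- ===== SOURCE B (Python) =====
-- def lateRide(n):
--     def digit_sum(v):
--         s = v % 10
--         while v >= 10:
--             v //= 10
--             s += v % 10
--         return s
--     return digit_sum(n // 60) + digit_sum(n % 60)
-- ===== Notes on version B (the rewrite author's own statement) =====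
-- stated objective: alternative
-- what changed: Replaces string conversion and per-character int() parsing with pure integer div/mod digit-sum loops over hours and minutes.
-- outside the precondition, e.g. on lateRide(-1): A raises ValueError, B returns 23
import Mathlib
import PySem

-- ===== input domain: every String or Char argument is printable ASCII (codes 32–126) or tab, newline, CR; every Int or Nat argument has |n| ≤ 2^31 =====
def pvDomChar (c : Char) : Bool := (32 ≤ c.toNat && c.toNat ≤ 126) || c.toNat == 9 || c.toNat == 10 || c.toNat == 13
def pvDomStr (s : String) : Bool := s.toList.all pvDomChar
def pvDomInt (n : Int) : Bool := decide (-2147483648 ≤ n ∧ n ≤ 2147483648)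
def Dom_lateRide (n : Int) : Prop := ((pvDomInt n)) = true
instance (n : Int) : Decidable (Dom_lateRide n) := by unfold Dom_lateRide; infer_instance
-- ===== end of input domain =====

-- B replaces A's string-conversion-and-parse digit sum by integer div/mod loops; equal on every non-negative n (A raises ValueError on negative n).

-- ===== PORT A =====
-- int(s) for a one-character string; on Pre_ (non-negative n) every character is a decimal
-- digit, so ofChars? is always `some` and the default is never used (A raises
-- exactly where ofChars? would be none; Pre_ excludes those inputs).
def pyIntChar (c : Char) : Int := (PySem.Int.ofChars? [c]).getD 0

def lateRide (n : Int) : Int :=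
  let hours := PySem.Int.floordiv n 60
  let minutes := PySem.Int.mod n 60
  let str_hours_minutes := PySem.Int.toChars hours ++ PySem.Int.toChars minutes
  str_hours_minutes.foldl (fun result s => result + pyIntChar s) 0

-- ===== PORT B =====
-- while v >= 10: v //= 10; s += v % 10
def digsumGo (v s : Int) : Int :=
  if 10 ≤ v then
    digsumGo (PySem.Int.floordiv v 10) (s + PySem.Int.mod (PySem.Int.floordiv v 10) 10)
  else s
termination_by v.toNat
decreasing_by
  rw [PySem.Int.floordiv_eq_ediv_of_pos (by omega)]
  omega

def digitSum (v : Int) : Int := digsumGo v (PySem.Int.mod v 10)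

def lateRide_alt (n : Int) : Int :=
  digitSum (PySem.Int.floordiv n 60) + digitSum (PySem.Int.mod n 60)

-- ===== PRECONDITION & SPEC =====
-- Pre_ excludes exactly the negative n, where A raises ValueError (str(hours) starts with '-', which int() rejects).
def Pre_lateRide (n : Int) : Prop := 0 ≤ n
instance (n : Int) : Decidable (Pre_lateRide n) := by unfold Pre_lateRide; infer_instance
def pvWitness_lateRide : Int := (240)

def Spec_lateRide (n : Int) (out : Int) : Prop := out = lateRide_alt n
instance (n : Int) (out : Int) : Decidable (Spec_lateRide n out) := by unfold Spec_lateRide; infer_instance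

-- ===== CLAIM (what is proved, stated in full; the proofs are below) =====
def Claim_equal_lateRide : Prop := ∀ (n : Int), Dom_lateRide n → Pre_lateRide n → Spec_lateRide n (lateRide n)

-- ===== LEMMAS AND PROOFS =====

-- digit sum of a natural number, as an Int
def digsumN (m : Nat) : Int := ((Nat.digits 10 m).sum : Int)

theorem digsumN_step (m : Nat) (hm : 0 < m) : digsumN m = (m % 10 : Nat) + digsumN (m / 10) := by
  unfold digsumN
  rw [Nat.digits_def' (by omega : 1 < 10) hm]
  push_cast [List.sum_cons]
  ring

theorem digsumN_lt (m : Nat) (hm : m < 10) : digsumN m = (m : Int) := by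
  rcases Nat.eq_zero_or_pos m with h | h
  · subst h; simp [digsumN]
  · rw [digsumN_step m h, Nat.mod_eq_of_lt hm, Nat.div_eq_of_lt hm]
    simp [digsumN]

theorem pyIntChar_digitChar : ∀ d : Nat, d < 10 → pyIntChar (Nat.digitChar d) = (d : Int) := by
  decide

-- A-side: char-value sum of Nat.toDigitsCore
theorem toDigitsCore_sum (f : Nat) : ∀ (m : Nat) (l : List Char), m < 10 ^ f →
    ((Nat.toDigitsCore 10 f m l).map pyIntChar).sum = digsumN m + ((l.map pyIntChar).sum) := by
  induction f with
  | zero =>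
    intro m l h
    have hm : m = 0 := by omega
    subst hm
    simp [Nat.toDigitsCore, digsumN]
  | succ f ih =>
    intro m l h
    rw [Nat.toDigitsCore]
    by_cases h0 : m / 10 = 0
    · simp only [h0, if_pos]
      have hm10 : m < 10 := by omega
      simp [Nat.mod_eq_of_lt hm10, pyIntChar_digitChar _ hm10, digsumN_lt m hm10]
    · simp only [if_neg h0]
      have hdiv : m / 10 < 10 ^ f := by
        rw [Nat.div_lt_iff_lt_mul (by omega)]
        calc m < 10 ^ (f + 1) := h
        _ = 10 ^ f * 10 := by ring
      rw [ih (m / 10) _ hdiv]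
      have hpos : 0 < m := by omega
      have hlt : m % 10 < 10 := Nat.mod_lt _ (by omega)
      rw [digsumN_step m hpos]
      simp [pyIntChar_digitChar _ hlt]
      ring

theorem toDigits_sum (m : Nat) :
    ((Nat.toDigits 10 m).map pyIntChar).sum = digsumN m := by
  have h : m < 10 ^ (m + 1) := by
    calc m < 10 ^ m := Nat.lt_pow_self (by omega)
    _ ≤ 10 ^ (m + 1) := Nat.pow_le_pow_right (by omega) (by omega)
  simpa using toDigitsCore_sum (m + 1) m [] h

-- B-side loop invariant
theorem digsumGo_eq (m : Nat) : ∀ s : Int, digsumGo (m : Int) s = s + digsumN (m / 10) := by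
  induction m using Nat.strong_induction_on with
  | _ m ih =>
    intro s
    rw [digsumGo]
    by_cases h : 10 ≤ m
    · have h' : (10 : Int) ≤ (m : Int) := by exact_mod_cast h
      rw [if_pos h']
      rw [show PySem.Int.floordiv (m : Int) 10 = ((m / 10 : Nat) : Int) from by
            exact_mod_cast PySem.Int.floordiv_natCast m 10,
          show PySem.Int.mod ((m / 10 : Nat) : Int) 10 = ((m / 10 % 10 : Nat) : Int) from by
            exact_mod_cast PySem.Int.mod_natCast (m / 10) 10]
      rw [ih (m / 10) (by omega)]
      rw [digsumN_step (m / 10) (by omega), Nat.div_div_eq_div_mul]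
      push_cast
      ring
    · have h' : ¬ (10 : Int) ≤ (m : Int) := by exact_mod_cast h
      rw [if_neg h']
      rw [Nat.div_eq_of_lt (by omega)]
      simp [digsumN]

theorem digitSum_eq (m : Nat) : digitSum (m : Int) = digsumN m := by
  unfold digitSum
  rw [show PySem.Int.mod (m : Int) 10 = ((m % 10 : Nat) : Int) from by
        exact_mod_cast PySem.Int.mod_natCast m 10,
      digsumGo_eq m]
  rcases Nat.eq_zero_or_pos m with h | h
  · subst h; simp [digsumN]
  · rw [digsumN_step m h]

-- foldl with + is init + sum of mapped values
theorem foldl_pyIntChar (l : List Char) : ∀ r : Int,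
    l.foldl (fun result s => result + pyIntChar s) r = r + (l.map pyIntChar).sum := by
  induction l with
  | nil => simp
  | cons c t ih => intro r; simp [List.foldl_cons, ih]; ring

theorem toChars_natCast (m : Nat) :
    PySem.Int.toChars (m : Int) = Nat.toDigits 10 m := by
  unfold PySem.Int.toChars
  rw [if_neg (by omega)]
  simp

-- ===== VERDICT (by name: the statement is the Claim_ definition above) =====
theorem lateRide_spec : Claim_equal_lateRide := by
  intro n _ hpre
  have hn0 : 0 ≤ n := hpre
  have hn : n = ((n.toNat : Nat) : Int) := by omega
  simp only [Spec_lateRide, lateRide, lateRide_alt]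
  rw [hn]
  set m := n.toNat
  rw [show PySem.Int.floordiv (m : Int) 60 = ((m / 60 : Nat) : Int) from by
        exact_mod_cast PySem.Int.floordiv_natCast m 60,
      show PySem.Int.mod (m : Int) 60 = ((m % 60 : Nat) : Int) from by
        exact_mod_cast PySem.Int.mod_natCast m 60]
  rw [toChars_natCast, toChars_natCast, digitSum_eq, digitSum_eq]
  rw [foldl_pyIntChar, List.map_append, List.sum_append, toDigits_sum, toDigits_sum]
  ring
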